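-- pv_equiv track=rewrite | github.com/JRMhere/csv_duplicate_remover | remove_duplicates_wip.py | rm_by_col
-- ===== SOURCE A (Python) =====
-- def rm_by_col(inl):
--     #inl = a list of dicts, per csv.DictReader input
--
--     #Each column gets its own list in the new dictionary of lists.
--     #For each column, add its entry to that corresponding list only if it's not already in the list.
--     #Then return the dictionary.
--
--     nl = {}
--     for item in inl: #item = dictionary
--         for ent in item: #ent = column header
--             if ent not in nl:
--                 nl[ent] = []
--             if item[ent] not in nl[ent]:
--                 nl[ent].append(item[ent])
--     return nl
-- ===== SOURCE B (Python) =====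
-- def rm_by_col(inl):
--     # Two passes: first group every value under its column (keeping duplicates),
--     # then dedup each column's value list by list-membership, preserving order.
--     cols = {}
--     for row in inl:
--         for ent in row:
--             cols.setdefault(ent, []).append(row[ent])
--     result = {}
--     for ent, vals in cols.items():
--         uniq = []
--         for v in vals:
--             if v not in uniq:
--                 uniq.append(v)
--         result[ent] = uniq
--     return result
-- ===== Notes on version B (the rewrite author's own statement) =====
-- stated objective: alternative
-- what changed: Replaces A's single interleaved pass (dedup-on-insert into the result dict) with two differently-shaped passes: first group all values per column keeping duplicates, then dedup each column's list by membership into a fresh result dict.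
import Mathlib
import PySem

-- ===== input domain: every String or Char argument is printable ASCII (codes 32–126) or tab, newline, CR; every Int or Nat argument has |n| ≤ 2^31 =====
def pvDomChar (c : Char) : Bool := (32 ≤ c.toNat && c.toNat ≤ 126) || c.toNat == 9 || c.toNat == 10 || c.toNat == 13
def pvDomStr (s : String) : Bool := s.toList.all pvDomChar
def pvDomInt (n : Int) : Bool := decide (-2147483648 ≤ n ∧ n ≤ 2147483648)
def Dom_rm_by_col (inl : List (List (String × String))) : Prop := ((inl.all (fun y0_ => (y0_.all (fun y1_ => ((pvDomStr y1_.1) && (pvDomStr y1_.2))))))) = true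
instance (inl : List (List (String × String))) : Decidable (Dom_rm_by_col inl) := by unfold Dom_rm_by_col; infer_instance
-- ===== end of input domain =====

-- B replaces A's single interleaved pass (dedup-on-insert) by two passes: group all
-- values per column keeping duplicates, then dedup each list; same cost, alternative shape.

-- ===== PORT A =====
-- one step of A's inner loop: ensure the key exists, then append the value if not present
def pvAStep (d : PySem.Dict String (List String)) (p : String × String) : PySem.Dict String (List String) :=
  let d1 := if d.contains p.1 then d else d.insert p.1 []
  if p.2 ∈ d1.getD p.1 [] then d1 else d1.insert p.1 (d1.getD p.1 [] ++ [p.2])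

def rm_by_col (inl : List (List (String × String))) : List (String × List String) :=
  (inl.foldl (fun d row => row.foldl pvAStep d) PySem.Dict.empty).items

-- ===== PORT B =====
-- B's inner dedup loop: append v only if it is not already in the accumulator
def pvDedup (l : List String) : List String :=
  l.foldl (fun acc v => if v ∈ acc then acc else acc ++ [v]) []

-- cols.setdefault(ent, []).append(row[ent])  ==  modify ent [] (· ++ [row[ent]])
def pvBStep (d : PySem.Dict String (List String)) (p : String × String) : PySem.Dict String (List String) :=
  d.modify p.1 [] (· ++ [p.2])

def rm_by_col_alt (inl : List (List (String × String))) : List (String × List String) :=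
  let cols := inl.foldl (fun d row => row.foldl pvBStep d) PySem.Dict.empty
  (cols.items.foldl (fun out q => out.insert q.1 (pvDedup q.2)) PySem.Dict.empty).items

-- ===== PRECONDITION & SPEC =====
def Spec_rm_by_col (inl : List (List (String × String))) (out : List (String × List String)) : Prop := out = rm_by_col_alt inl
instance (inl : List (List (String × String))) (out : List (String × List String)) : Decidable (Spec_rm_by_col inl out) := by unfold Spec_rm_by_col; infer_instance

-- ===== CLAIM (what is proved, stated in full; the proofs are below) =====
def Claim_equal_rm_by_col : Prop := ∀ (inl : List (List (String × String))), Dom_rm_by_col inl → Spec_rm_by_col inl (rm_by_col inl)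

-- ===== LEMMAS AND PROOFS =====

-- the invariant relating A's dict to B's grouping dict
def pvInv (dA dB : PySem.Dict String (List String)) : Prop :=
  dA.keys = dB.keys ∧ dB.keys.Nodup ∧ ∀ k, dA.getD k [] = pvDedup (dB.getD k [])

theorem pvDedup_append (l : List String) (v : String) :
    pvDedup (l ++ [v]) = if v ∈ pvDedup l then pvDedup l else pvDedup l ++ [v] := by
  simp [pvDedup, List.foldl_append]

theorem pvInv_step (dA dB : PySem.Dict String (List String)) (p : String × String)
    (h : pvInv dA dB) : pvInv (pvAStep dA p) (pvBStep dB p) := by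
  obtain ⟨hk, hnd, hg⟩ := h
  have hc : dA.contains p.1 = dB.contains p.1 := by
    rw [PySem.Dict.contains_eq_decide_mem_keys, PySem.Dict.contains_eq_decide_mem_keys, hk]
  by_cases hmem : dB.contains p.1 = true
  · -- key already present in both dicts
    have hstepA : pvAStep dA p =
        if p.2 ∈ dA.getD p.1 [] then dA else dA.insert p.1 (dA.getD p.1 [] ++ [p.2]) := by
      simp [pvAStep, hc, hmem]
    refine ⟨?_, ?_, ?_⟩
    · rw [hstepA]
      have hkB : (pvBStep dB p).keys = dB.keys := by
        rw [pvBStep, PySem.Dict.keys_modify, PySem.Dict.keys_insert_of_contains _ _ hmem]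
      rw [hkB]
      split
      · exact hk
      · rw [PySem.Dict.keys_insert_of_contains _ _ (by rw [hc]; exact hmem)]; exact hk
    · rw [pvBStep, PySem.Dict.keys_modify, PySem.Dict.keys_insert_of_contains _ _ hmem]
      exact hnd
    · intro k
      rw [hstepA, pvBStep, PySem.Dict.getD_modify]
      by_cases hke : k = p.1
      · subst hke
        rw [if_pos rfl, pvDedup_append, hg p.1]
        by_cases hm : p.2 ∈ pvDedup (dB.getD p.1 [])
        · rw [if_pos hm, if_pos hm, hg p.1]
        · rw [if_neg hm, if_neg hm, PySem.Dict.getD_insert_self]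
      · rw [if_neg hke]
        split
        · exact hg k
        · rw [PySem.Dict.getD_insert, if_neg hke]; exact hg k
  · -- fresh key: both sides create it
    have hmem' : dB.contains p.1 = false := by simpa using hmem
    have hcA : dA.contains p.1 = false := by rw [hc]; exact hmem'
    have hDB0 : dB.getD p.1 [] = [] := PySem.Dict.getD_of_not_contains dB [] hmem'
    have hstepA : pvAStep dA p = dA.insert p.1 [p.2] := by
      simp [pvAStep, hcA, PySem.Dict.getD_insert_self, PySem.Dict.insert_insert_self]
    have hkB : (pvBStep dB p).keys = dB.keys ++ [p.1] := by
      rw [pvBStep, PySem.Dict.keys_modify, PySem.Dict.keys_insert_of_not_contains _ _ hmem']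
    refine ⟨?_, ?_, ?_⟩
    · rw [hstepA, hkB, PySem.Dict.keys_insert_of_not_contains _ _ hcA, hk]
    · rw [hkB]
      have : p.1 ∉ dB.keys := by
        intro hin
        rw [(PySem.Dict.contains_iff_mem_keys dB p.1).mpr hin] at hmem'
        exact absurd hmem' (by simp)
      simp [List.nodup_append, hnd]
      exact fun a ha he => this (he ▸ ha)
    · intro k
      rw [hstepA, pvBStep, PySem.Dict.getD_modify, PySem.Dict.getD_insert]
      by_cases hke : k = p.1
      · subst hke
        rw [if_pos rfl, if_pos rfl, hDB0]
        rfl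
      · rw [if_neg hke, if_neg hke]; exact hg k

theorem pvInv_foldl (l : List (String × String)) (dA dB : PySem.Dict String (List String))
    (h : pvInv dA dB) : pvInv (l.foldl pvAStep dA) (l.foldl pvBStep dB) := by
  induction l generalizing dA dB with
  | nil => exact h
  | cons p t ih => exact ih _ _ (pvInv_step dA dB p h)

-- the nested row loop flattens to a single fold over all (column, value) pairs
theorem pvFoldl_flat (step : PySem.Dict String (List String) → (String × String) → PySem.Dict String (List String))
    (inl : List (List (String × String))) (d : PySem.Dict String (List String)) :
    inl.foldl (fun d row => row.foldl step d) d = (inl.flatMap id).foldl step d := by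
  induction inl generalizing d with
  | nil => rfl
  | cons r t ih => simp [List.foldl_append, ih]

-- ===== VERDICT (by name: the statement is the Claim_ definition above) =====
theorem rm_by_col_spec : Claim_equal_rm_by_col := by
  intro inl _
  unfold Spec_rm_by_col rm_by_col rm_by_col_alt
  rw [pvFoldl_flat pvAStep, pvFoldl_flat pvBStep]
  set l := inl.flatMap id with hl
  have hinv : pvInv (l.foldl pvAStep PySem.Dict.empty) (l.foldl pvBStep PySem.Dict.empty) := by
    apply pvInv_foldl
    refine ⟨rfl, by simp [PySem.Dict.keys_empty], fun k => by rw [PySem.Dict.getD_empty]; rfl⟩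
  obtain ⟨hk, hnd, hg⟩ := hinv
  set dA := l.foldl pvAStep PySem.Dict.empty
  set dB := l.foldl pvBStep PySem.Dict.empty
  have hfresh : ∀ q ∈ dB.items, (PySem.Dict.empty : PySem.Dict String (List String)).contains q.1 = false :=
    fun q _ => PySem.Dict.contains_empty q.1
  have hndfst : (dB.items.map Prod.fst).Nodup := hnd
  have hitems := PySem.Dict.items_foldl_insert_fresh dB.items Prod.fst (fun q => pvDedup q.2)
      PySem.Dict.empty hfresh hndfst
  rw [hitems]
  have hA : dA.items = dA.keys.map (fun k => (k, dA.getD k [])) :=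
    PySem.Dict.items_eq_map_keys dA (hk ▸ hnd) []
  have hB : dB.items = dB.keys.map (fun k => (k, dB.getD k [])) :=
    PySem.Dict.items_eq_map_keys dB hnd []
  rw [hA, hB, hk]
  show _ = List.map _ (List.map _ _)
  simp only [List.map_map]
  exact List.map_congr_left (fun k _ => by simp [hg k])
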